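-- pv_equiv track=rewrite | github.com/Dante-249/FlaskATS | boolean_engine.py | evaluate_rpn
-- ===== SOURCE A (Python) =====
-- class BooleanSearchError(Exception):
--     pass
--
-- def evaluate_rpn(rpn, text, phrase_map):
--     """
--     Evaluate RPN expression against resume text
--     """
--     stack = []
--     text = text.lower()
--
--     def check(token):
--         if token in phrase_map:
--             return phrase_map[token] in text
--         return token in text
--
--     for token in rpn:
--         if token == "NOT":
--             if not stack:
--                 raise BooleanSearchError("NOT operator missing operand")
--             stack.append(not stack.pop())
--
--         elif token in ("AND", "OR"):
--             if len(stack) < 2: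
--                 raise BooleanSearchError(f"{token} operator missing operands")
--             b = stack.pop()
--             a = stack.pop()
--             stack.append(a and b if token == "AND" else a or b)
--
--         else:
--             stack.append(check(token))
--
--     if len(stack) != 1:
--         raise BooleanSearchError("Invalid boolean expression")
--
--     return stack[0]
-- ===== SOURCE B (Python) =====
-- class BooleanSearchError(Exception):
--     pass
--
-- def evaluate_rpn(rpn, text, phrase_map):
--     """
--     Evaluate RPN expression against resume text (recursive right-to-left parser).
--     """
--     low = text.lower()
--
--     def parse(i):
--         # Parse one complete expression whose last token is rpn[i-1];
--         # return (value, index just left of the consumed tokens).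
--         if i == 0:
--             raise BooleanSearchError("missing operand")
--         tok = rpn[i - 1]
--         if tok == "NOT":
--             v, j = parse(i - 1)
--             return (not v, j)
--         if tok in ("AND", "OR"):
--             b, j = parse(i - 1)
--             a, k = parse(j)
--             return (a and b if tok == "AND" else a or b, k)
--         phrase = phrase_map[tok] if tok in phrase_map else tok
--         return (phrase in low, i - 1)
--
--     value, rest = parse(len(rpn))
--     if rest != 0:
--         raise BooleanSearchError("Invalid boolean expression")
--     return value
-- ===== Notes on version B (the rewrite author's own statement) =====
-- stated objective: alternative
-- what changed: Replaced A's left-to-right iterative stack evaluation by a recursive right-to-left descent parser that consumes one expression at a time and returns (value, leftmost unconsumed index).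
import Mathlib
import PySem

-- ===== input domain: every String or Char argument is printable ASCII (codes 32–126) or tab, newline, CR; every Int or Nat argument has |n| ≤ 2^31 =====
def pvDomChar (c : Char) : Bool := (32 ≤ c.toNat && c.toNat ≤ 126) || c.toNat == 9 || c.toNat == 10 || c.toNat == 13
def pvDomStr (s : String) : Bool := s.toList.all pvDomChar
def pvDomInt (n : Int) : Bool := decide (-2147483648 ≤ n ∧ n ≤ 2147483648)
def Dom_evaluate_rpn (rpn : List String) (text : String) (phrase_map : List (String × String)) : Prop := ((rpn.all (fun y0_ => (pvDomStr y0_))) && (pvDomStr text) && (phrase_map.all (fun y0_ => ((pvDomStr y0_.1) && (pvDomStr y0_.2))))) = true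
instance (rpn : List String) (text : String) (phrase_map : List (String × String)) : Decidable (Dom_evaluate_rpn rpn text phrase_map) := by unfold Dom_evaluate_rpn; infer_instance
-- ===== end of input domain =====

-- B replaces A's left-to-right stack loop by a recursive right-to-left descent
-- parser (alternative decomposition, same cost); equal on all valid RPN inputs.

-- ===== PORT A =====
-- A's inner `check`: phrase_map[token] in text if token in phrase_map else token in text
def pvCheckTok (phrase_map : List (String × String)) (low : String) (token : String) : Bool :=
  if (PySem.Dict.mk phrase_map).contains token then
    PySem.Str.isIn (((PySem.Dict.mk phrase_map).get? token).getD "") low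
  else
    PySem.Str.isIn token low

-- one iteration of A's `for token in rpn` loop; `none` = BooleanSearchError raised
def pvStepA (check : String → Bool) (st : Option (List Bool)) (token : String) : Option (List Bool) :=
  match st with
  | none => none
  | some stack =>
    if token == "NOT" then
      match stack with
      | [] => none
      | v :: rest => some ((!v) :: rest)
    else if token == "AND" || token == "OR" then
      match stack with
      | b :: a :: rest => some ((if token == "AND" then a && b else a || b) :: rest)
      | _ => none
    else some (check token :: stack)

def evaluate_rpn (rpn : List String) (text : String) (phrase_map : List (String × String)) : Bool :=
  let low := PySem.Str.lower text
  match rpn.foldl (pvStepA (pvCheckTok phrase_map low)) (some []) with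
  | some [v] => v
  | _ => false     -- A raises BooleanSearchError here (excluded by Pre_)

-- ===== PORT B =====
-- Source B's `parse(i)`: parse the expression ending at rpn[i-1], return (value, leftmost
-- unconsumed index); `none` = BooleanSearchError. Fuel = i at the top call suffices
-- since every recursive call consumes at least one token.
def pvParse (rpn : List String) (check : String → Bool) : Nat → Nat → Option (Bool × Nat)
  | _, 0 => none
  | 0, _ + 1 => none
  | fuel + 1, i + 1 =>
    if rpn.getD i "" == "NOT" then
      match pvParse rpn check fuel i with
      | some (v, j) => some (!v, j)
      | none => none
    else if rpn.getD i "" == "AND" || rpn.getD i "" == "OR" then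
      match pvParse rpn check fuel i with
      | some (b, j) =>
        match pvParse rpn check fuel j with
        | some (a, k) => some ((if rpn.getD i "" == "AND" then a && b else a || b), k)
        | none => none
      | none => none
    else some (check (rpn.getD i ""), i)

-- Source B's `phrase = phrase_map[tok] if tok in phrase_map else tok; phrase in low`
def pvCheckB (phrase_map : List (String × String)) (low : String) (tok : String) : Bool :=
  PySem.Str.isIn
    (match (PySem.Dict.mk phrase_map).get? tok with
     | some p => p
     | none => tok) low

def evaluate_rpn_alt (rpn : List String) (text : String) (phrase_map : List (String × String)) : Bool :=
  let low := PySem.Str.lower text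
  match pvParse rpn (pvCheckB phrase_map low) rpn.length rpn.length with
  | some (value, rest) => if rest = 0 then value else false   -- `if rest != 0: raise` (excluded by Pre_)
  | none => false                                             -- parse raised (excluded by Pre_)

-- ===== PRECONDITION & SPEC =====
-- token weight: operand +1, AND/OR -1, NOT 0; prefix count = stack height in A's loop
def pvWt (t : String) : Int := if t == "NOT" then 0 else if t == "AND" || t == "OR" then -1 else 1
def pvPC (rpn : List String) (k : Nat) : Int := ((rpn.take k).map pvWt).sum

-- exactly the inputs on which A returns (a well-formed RPN expression): the stack
-- before each NOT has ≥ 1 entry, before each AND/OR ≥ 2, and exactly 1 at the end;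
-- on every other input A raises BooleanSearchError.
def Pre_evaluate_rpn (rpn : List String) (text : String) (phrase_map : List (String × String)) : Prop :=
  pvPC rpn rpn.length = 1 ∧
  ∀ i, i < rpn.length →
    (rpn.getD i "" = "NOT" → 1 ≤ pvPC rpn i) ∧
    ((rpn.getD i "" = "AND" ∨ rpn.getD i "" = "OR") → 2 ≤ pvPC rpn i)

instance (rpn : List String) (text : String) (phrase_map : List (String × String)) : Decidable (Pre_evaluate_rpn rpn text phrase_map) := by unfold Pre_evaluate_rpn; infer_instance

def pvWitness_evaluate_rpn : List String × String × (List (String × String)) :=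
  (["py", "java", "OR", "NOT"], "I know Java well", [("py", "python")])

def Spec_evaluate_rpn (rpn : List String) (text : String) (phrase_map : List (String × String)) (out : Bool) : Prop := out = evaluate_rpn_alt rpn text phrase_map
instance (rpn : List String) (text : String) (phrase_map : List (String × String)) (out : Bool) : Decidable (Spec_evaluate_rpn rpn text phrase_map out) := by unfold Spec_evaluate_rpn; infer_instance

-- ===== CLAIM (what is proved, stated in full; the proofs are below) =====
def Claim_equal_evaluate_rpn : Prop := ∀ (rpn : List String) (text : String) (phrase_map : List (String × String)), Dom_evaluate_rpn rpn text phrase_map → Pre_evaluate_rpn rpn text phrase_map → Spec_evaluate_rpn rpn text phrase_map (evaluate_rpn rpn text phrase_map)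

-- ===== LEMMAS AND PROOFS =====

theorem pvCheck_eq (phrase_map : List (String × String)) (low : String) :
    pvCheckTok phrase_map low = pvCheckB phrase_map low := by
  funext token
  unfold pvCheckTok pvCheckB
  rw [PySem.Dict.contains_eq_isSome_get?]
  cases (PySem.Dict.mk phrase_map).get? token <;> simp

theorem pvPC_succ (rpn : List String) (k : Nat) (hk : k < rpn.length) :
    pvPC rpn (k + 1) = pvPC rpn k + pvWt (rpn.getD k "") := by
  unfold pvPC
  rw [List.getD_eq_getElem?_getD, List.getElem?_eq_getElem hk, Option.getD_some,
      List.map_take, List.map_take, List.sum_take_succ _ k (by simpa using hk),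
      List.getElem_map]

theorem pvSeg_split (rpn : List String) (a b c : Nat) (h1 : a ≤ b) (h2 : b ≤ c) :
    (rpn.drop a).take (c - a) = (rpn.drop a).take (b - a) ++ (rpn.drop b).take (c - b) := by
  have : c - a = (b - a) + (c - b) := by omega
  rw [this, List.take_add, List.drop_drop]
  have hb : a + (b - a) = b := by omega
  rw [hb]

theorem pvSeg_single (rpn : List String) (i : Nat) (hi : i < rpn.length) :
    (rpn.drop i).take 1 = [rpn.getD i ""] := by
  rw [List.getD_eq_getElem?_getD, List.getElem?_eq_getElem hi, Option.getD_some,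
      List.drop_eq_getElem_cons hi]
  rfl

theorem pvParse_sound (rpn : List String) (c : String → Bool) :
    ∀ fuel i v j, i ≤ rpn.length → pvParse rpn c fuel i = some (v, j) →
      j ≤ i ∧ ∀ s, ((rpn.drop j).take (i - j)).foldl (pvStepA c) (some s) = some (v :: s) := by
  intro fuel
  induction fuel with
  | zero =>
    intro i v j _ hp
    cases i <;> simp [pvParse] at hp
  | succ fuel ih =>
    intro i v j hi hp
    cases i with
    | zero => simp [pvParse] at hp
    | succ i' =>
      have hi' : i' < rpn.length := by omega
      simp only [pvParse] at hp
      by_cases h1 : (rpn.getD i' "" == "NOT") = true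
      · rw [if_pos h1] at hp
        cases hrec : pvParse rpn c fuel i' with
        | none => rw [hrec] at hp; exact absurd hp (by simp)
        | some vj =>
          obtain ⟨v₀, j₀⟩ := vj
          rw [hrec] at hp
          simp only [Option.some.injEq, Prod.mk.injEq] at hp
          obtain ⟨hv, hj⟩ := hp
          obtain ⟨hj0, hrun⟩ := ih i' v₀ j₀ (by omega) hrec
          subst hv hj
          refine ⟨by omega, fun s => ?_⟩
          rw [pvSeg_split rpn j₀ i' (i' + 1) hj0 (by omega), List.foldl_append, hrun s]
          have h11 : i' + 1 - i' = 1 := by omega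
          rw [h11, pvSeg_single rpn i' hi']
          simp only [List.foldl_cons, List.foldl_nil, pvStepA]
          rw [if_pos h1]
      · rw [if_neg h1] at hp
        by_cases h2 : (rpn.getD i' "" == "AND" || rpn.getD i' "" == "OR") = true
        · rw [if_pos h2] at hp
          cases hrec1 : pvParse rpn c fuel i' with
          | none => rw [hrec1] at hp; exact absurd hp (by simp)
          | some bj =>
            obtain ⟨b₀, j₁⟩ := bj
            rw [hrec1] at hp
            dsimp only at hp
            obtain ⟨hj1, hrun1⟩ := ih i' b₀ j₁ (by omega) hrec1
            cases hrec2 : pvParse rpn c fuel j₁ with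
            | none => rw [hrec2] at hp; exact absurd hp (by simp)
            | some ak =>
              obtain ⟨a₀, j₂⟩ := ak
              rw [hrec2] at hp
              dsimp only at hp
              simp only [Option.some.injEq, Prod.mk.injEq] at hp
              obtain ⟨hv, hj⟩ := hp
              obtain ⟨hj2, hrun2⟩ := ih j₁ a₀ j₂ (by omega) hrec2
              subst hv hj
              refine ⟨by omega, fun s => ?_⟩
              rw [pvSeg_split rpn j₂ j₁ (i' + 1) hj2 (by omega), List.foldl_append, hrun2 s,
                  pvSeg_split rpn j₁ i' (i' + 1) hj1 (by omega), List.foldl_append, hrun1 _]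
              have h11 : i' + 1 - i' = 1 := by omega
              rw [h11, pvSeg_single rpn i' hi']
              simp only [List.foldl_cons, List.foldl_nil, pvStepA]
              rw [if_neg h1, if_pos h2]
        · rw [if_neg h2] at hp
          simp only [Option.some.injEq, Prod.mk.injEq] at hp
          obtain ⟨hv, hj⟩ := hp
          subst hv hj
          refine ⟨by omega, fun s => ?_⟩
          have h11 : i' + 1 - i' = 1 := by omega
          rw [h11, pvSeg_single rpn i' hi']
          simp only [List.foldl_cons, List.foldl_nil, pvStepA]
          rw [if_neg h1, if_neg h2]

theorem pvParse_complete (rpn : List String)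
    (hc : ∀ i, i < rpn.length →
      (rpn.getD i "" = "NOT" → 1 ≤ pvPC rpn i) ∧
      ((rpn.getD i "" = "AND" ∨ rpn.getD i "" = "OR") → 2 ≤ pvPC rpn i))
    (c : String → Bool) :
    ∀ fuel i, i ≤ fuel → i ≤ rpn.length → 1 ≤ pvPC rpn i →
      ∃ v j, pvParse rpn c fuel i = some (v, j) ∧ j ≤ i ∧ pvPC rpn j = pvPC rpn i - 1 := by
  intro fuel
  induction fuel with
  | zero =>
    intro i hif _ hpc
    have : i = 0 := by omega
    subst this
    simp [pvPC] at hpc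
  | succ fuel ih =>
    intro i hif hil hpc
    cases i with
    | zero => simp [pvPC] at hpc
    | succ i' =>
      have hi' : i' < rpn.length := by omega
      have hstep := pvPC_succ rpn i' hi'
      by_cases h1 : rpn.getD i' "" = "NOT"
      · have hge := (hc i' hi').1 h1
        obtain ⟨v, j, hp, hj, hpcj⟩ := ih i' (by omega) (by omega) hge
        refine ⟨!v, j, ?_, by omega, ?_⟩
        · simp only [pvParse]
          rw [if_pos (by simp only [beq_iff_eq]; exact h1), hp]
        · have hw : pvWt (rpn.getD i' "") = 0 := by rw [h1]; decide
          rw [hstep, hw]; omega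
      · by_cases h2 : rpn.getD i' "" = "AND" ∨ rpn.getD i' "" = "OR"
        · have hge := (hc i' hi').2 h2
          have hw : pvWt (rpn.getD i' "") = -1 := by
            rcases h2 with h | h <;> rw [h] <;> decide
          obtain ⟨b, j₁, hp1, hj1, hpc1⟩ := ih i' (by omega) (by omega) (by omega)
          obtain ⟨a, j₂, hp2, hj2, hpc2⟩ := ih j₁ (by omega) (by omega) (by omega)
          refine ⟨(if rpn.getD i' "" == "AND" then a && b else a || b), j₂, ?_, by omega, ?_⟩
          · simp only [pvParse]
            have hb2 : (rpn.getD i' "" == "AND" || rpn.getD i' "" == "OR") = true := by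
              simp only [Bool.or_eq_true, beq_iff_eq]; exact h2
            rw [if_neg (by simp only [beq_iff_eq]; exact h1), if_pos hb2, hp1]
            dsimp only
            rw [hp2]
          · rw [hstep, hw]; omega
        · refine ⟨c (rpn.getD i' ""), i', ?_, by omega, ?_⟩
          · have h2' : ¬(rpn.getD i' "" = "AND") ∧ ¬(rpn.getD i' "" = "OR") := by tauto
            simp only [pvParse]
            rw [if_neg (by simp only [beq_iff_eq]; exact h1),
                if_neg (by simp only [Bool.or_eq_true, beq_iff_eq]; tauto)]
          · have hw : pvWt (rpn.getD i' "") = 1 := by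
              have hb1 : (rpn.getD i' "" == "NOT") = false := by simpa using h1
              have h2' : ¬(rpn.getD i' "" = "AND") ∧ ¬(rpn.getD i' "" = "OR") := by tauto
              have hb2 : (rpn.getD i' "" == "AND" || rpn.getD i' "" == "OR") = false := by
                simp only [Bool.or_eq_false_iff, beq_eq_false_iff_ne]
                exact ⟨h2'.1, h2'.2⟩
              simp only [pvWt, hb1, hb2, Bool.false_eq_true, if_false]
            rw [hstep, hw]; omega

theorem pvPC_pos (rpn : List String)
    (hc : ∀ i, i < rpn.length →
      (rpn.getD i "" = "NOT" → 1 ≤ pvPC rpn i) ∧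
      ((rpn.getD i "" = "AND" ∨ rpn.getD i "" = "OR") → 2 ≤ pvPC rpn i)) :
    ∀ k, k ≤ rpn.length → 0 ≤ pvPC rpn k ∧ (1 ≤ k → 1 ≤ pvPC rpn k) := by
  intro k
  induction k with
  | zero => intro _; simp [pvPC]
  | succ k ih =>
    intro hk
    have hklt : k < rpn.length := by omega
    have ihk := ih (by omega)
    have hstep := pvPC_succ rpn k hklt
    rcases hc k hklt with ⟨hnot, hop⟩
    have hi0 := ihk.1
    by_cases h1 : rpn.getD k "" = "NOT"
    · have h1' := hnot h1
      have hw : pvWt (rpn.getD k "") = 0 := by rw [h1]; decide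
      rw [hstep, hw]
      exact ⟨by omega, fun _ => by omega⟩
    · by_cases h2 : rpn.getD k "" = "AND" ∨ rpn.getD k "" = "OR"
      · have h2' := hop h2
        have hw : pvWt (rpn.getD k "") = -1 := by
          rcases h2 with h2 | h2 <;> rw [h2] <;> decide
        rw [hstep, hw]
        exact ⟨by omega, fun _ => by omega⟩
      · have hw : pvWt (rpn.getD k "") = 1 := by
          have h2' : ¬(rpn.getD k "" = "AND") ∧ ¬(rpn.getD k "" = "OR") := by tauto
          have hb1 : (rpn.getD k "" == "NOT") = false := by simpa using h1
          have hb2 : (rpn.getD k "" == "AND" || rpn.getD k "" == "OR") = false := by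
            simp only [Bool.or_eq_false_iff, beq_eq_false_iff_ne]
            exact ⟨h2'.1, h2'.2⟩
          simp only [pvWt, hb1, hb2, Bool.false_eq_true, if_false]
        rw [hstep, hw]
        exact ⟨by omega, fun _ => by omega⟩

-- ===== VERDICT (by name: the statement is the Claim_ definition above) =====
theorem evaluate_rpn_spec : Claim_equal_evaluate_rpn := by
  intro rpn text phrase_map _ hpre
  unfold Spec_evaluate_rpn evaluate_rpn evaluate_rpn_alt
  simp only [pvCheck_eq]
  set c := pvCheckB phrase_map (PySem.Str.lower text) with hc
  rcases hpre with ⟨htot, hcond⟩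
  obtain ⟨v, j, hparse, hj, hpc⟩ :=
    pvParse_complete rpn hcond c rpn.length rpn.length le_rfl le_rfl (by omega)
  have hj0 : j = 0 := by
    by_contra h
    have := (pvPC_pos rpn hcond j (by omega)).2 (by omega)
    omega
  subst hj0
  obtain ⟨-, hrun⟩ := pvParse_sound rpn c rpn.length rpn.length v 0 le_rfl hparse
  have := hrun []
  simp only [List.drop_zero, Nat.sub_zero, List.take_length] at this
  rw [this, hparse]
  rfl
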